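-- pv_equiv track=rewrite | github.com/AlexWUrobot/leetcode_python | Maximum Domino Removals.py | maxDominoRemovals
-- ===== SOURCE A (Python) =====
-- from bisect import bisect_left
--
-- def length_of_LIS(arr):
--     """ Returns the length of the Longest Increasing Subsequence using O(n log n) approach. """
--     lis = []
--     for num in arr:
--         pos = bisect_left(lis, num)
--         if pos == len(lis):
--             lis.append(num)
--         else:
--             lis[pos] = num
--     return len(lis)
--
-- def maxDominoRemovals(tiles, removalOrder, minOrder):
--     n = len(tiles)
--
--     # Binary search for max removals
--     left, right = 0, n
--     removal_pos = {val: idx for idx, val in enumerate(removalOrder)}  # Store removal positions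
--
--     def canRemove(k):
--         """ Check if we can remove k elements while keeping LIS >= minOrder """
--         # Mark the first k elements as removed
--         removed = set(removalOrder[:k])
--         filtered_tiles = [tiles[i] for i in range(n) if i not in removed]
--
--         return length_of_LIS(filtered_tiles) >= minOrder
--
--     # Binary search for maximum k
--     while left < right:
--         mid = (left + right + 1) // 2
--         if canRemove(mid):
--             left = mid  # Try removing more
--         else:
--             right = mid - 1  # Reduce removals
--
--     return left
-- ===== SOURCE B (Python) =====
-- def maxDominoRemovals(tiles, removalOrder, minOrder):
--     n = len(tiles)
--
--     # first removal step of each index (first occurrence wins)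
--     first = {}
--     for j, v in enumerate(removalOrder):
--         if v not in first:
--             first[v] = j
--
--     def lis_dp(arr):
--         """Length of the longest strictly increasing subsequence, O(m^2) DP."""
--         best = 0
--         dp = []  # dp[j] = LIS length ending at arr[j]
--         for x in arr:
--             d = 1
--             for v, dv in dp:
--                 if v < x and dv + 1 > d:
--                     d = dv + 1
--             dp.append((x, d))
--             if d > best:
--                 best = d
--         return best
--
--     def canRemove(k):
--         filtered = [tiles[i] for i in range(n)
--                     if i not in first or first[i] >= k]
--         return lis_dp(filtered) >= minOrder
--
--     left, right = 0, n
--     while left < right: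
--         mid = (left + right + 1) // 2
--         if canRemove(mid):
--             left = mid
--         else:
--             right = mid - 1
--     return left
-- ===== Notes on version B (the rewrite author's own statement) =====
-- stated objective: alternative
-- what changed: Replaces the patience-sorting (bisect_left) LIS helper with an O(m^2) table-filling DP over (value, best-length-ending-here) pairs, and replaces the per-probe set(removalOrder[:k]) rebuild with a first-removal-index dict built once and compared against k; the outer binary search is kept.
import Mathlib
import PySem

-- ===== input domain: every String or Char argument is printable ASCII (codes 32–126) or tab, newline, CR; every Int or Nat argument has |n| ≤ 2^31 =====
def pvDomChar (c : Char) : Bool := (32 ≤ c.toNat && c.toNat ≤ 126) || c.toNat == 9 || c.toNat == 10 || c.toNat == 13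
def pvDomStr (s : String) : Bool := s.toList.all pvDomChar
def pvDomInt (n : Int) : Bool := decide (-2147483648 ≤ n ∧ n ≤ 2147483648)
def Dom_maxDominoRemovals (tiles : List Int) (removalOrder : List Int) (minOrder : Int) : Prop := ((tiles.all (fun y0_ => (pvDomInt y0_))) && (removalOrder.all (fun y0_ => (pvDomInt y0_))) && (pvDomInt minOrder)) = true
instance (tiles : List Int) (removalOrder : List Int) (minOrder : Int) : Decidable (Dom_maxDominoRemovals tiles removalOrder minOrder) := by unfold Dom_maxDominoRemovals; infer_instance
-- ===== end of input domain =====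

-- B replaces A's patience-sorting LIS by an O(m^2) DP table and the per-probe
-- `set(removalOrder[:k])` by a dict of first removal indices built once (objective: alternative).

-- ===== PORT A =====

-- one iteration of length_of_LIS's loop (bisect_left ported as PySem.List.bisectLeft)
def pvLisStepA (l : List Int) (x : Int) : List Int :=
  let pos := PySem.List.bisectLeft l x
  if pos = l.length then l ++ [x] else l.set pos x

-- length_of_LIS
def pvLengthOfLIS (arr : List Int) : Int :=
  ((arr.foldl pvLisStepA []).length : Int)

-- {val: idx for idx, val in enumerate(removalOrder)}  (unused by A, ported faithfully)
def pvRemovalPos (removalOrder : List Int) : PySem.Dict Int Int :=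
  (PySem.List.enumerate removalOrder 0).foldl (fun d p => d.insert p.2 p.1) PySem.Dict.empty

-- canRemove(k) of A
def pvCanRemoveA (tiles : List Int) (removalOrder : List Int) (minOrder : Int) (k : Int) : Bool :=
  let n : Int := (tiles.length : Int)
  let removed : PySem.Set Int := PySem.Set.ofList (PySem.List.slice removalOrder none (some k))
  let filtered : List Int :=
    (PySem.List.pyRange 0 n 1).foldl
      (fun acc i => if PySem.Set.contains removed i then acc
                    else acc ++ [PySem.List.pyGetD tiles i 0]) []
  decide (minOrder ≤ pvLengthOfLIS filtered)

-- the binary-search loop shared verbatim by both Pythons; the Nat fuel is only a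
-- totality guard (right - left strictly decreases, so it is never exhausted mid-loop)
def pvBisearchGo (fuel : Nat) (can : Int → Bool) (left right : Int) : Int :=
  match fuel with
  | 0 => left
  | fuel + 1 =>
    if left < right then
      let mid := PySem.Int.floordiv (left + right + 1) 2
      if can mid then pvBisearchGo fuel can mid right else pvBisearchGo fuel can left (mid - 1)
    else left

def pvBisearch (can : Int → Bool) (left right : Int) : Int :=
  pvBisearchGo (right - left).toNat can left right

def maxDominoRemovals (tiles : List Int) (removalOrder : List Int) (minOrder : Int) : Int :=
  let n : Int := (tiles.length : Int)
  let _removal_pos := pvRemovalPos removalOrder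
  pvBisearch (pvCanRemoveA tiles removalOrder minOrder) 0 n

-- ===== PORT B =====

-- first = {} ; for j, v in enumerate(removalOrder): if v not in first: first[v] = j
def pvFirstDict (removalOrder : List Int) : PySem.Dict Int Int :=
  (PySem.List.enumerate removalOrder 0).foldl
    (fun d p => if d.contains p.2 then d else d.insert p.2 p.1) PySem.Dict.empty

-- body of lis_dp's outer loop: state (best, dp)
def pvLisDPStep (st : Int × List (Int × Int)) (x : Int) : Int × List (Int × Int) :=
  let d := st.2.foldl (fun d p => if p.1 < x ∧ p.2 + 1 > d then p.2 + 1 else d) 1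
  (if d > st.1 then d else st.1, st.2 ++ [(x, d)])

def pvLisDP (arr : List Int) : Int :=
  (arr.foldl pvLisDPStep (0, [])).1

-- canRemove(k) of B
def pvCanRemoveB (tiles : List Int) (first : PySem.Dict Int Int) (minOrder : Int) (k : Int) : Bool :=
  let n : Int := (tiles.length : Int)
  let filtered : List Int :=
    (PySem.List.pyRange 0 n 1).foldl
      (fun acc i => if ¬ first.contains i ∨ k ≤ first.getD i 0
                    then acc ++ [PySem.List.pyGetD tiles i 0] else acc) []
  decide (minOrder ≤ pvLisDP filtered)

def maxDominoRemovals_alt (tiles : List Int) (removalOrder : List Int) (minOrder : Int) : Int :=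
  let n : Int := (tiles.length : Int)
  let first := pvFirstDict removalOrder
  pvBisearch (fun k => pvCanRemoveB tiles first minOrder k) 0 n

-- ===== PRECONDITION & SPEC =====
def Spec_maxDominoRemovals (tiles : List Int) (removalOrder : List Int) (minOrder : Int) (out : Int) : Prop := out = maxDominoRemovals_alt tiles removalOrder minOrder
instance (tiles : List Int) (removalOrder : List Int) (minOrder : Int) (out : Int) : Decidable (Spec_maxDominoRemovals tiles removalOrder minOrder out) := by unfold Spec_maxDominoRemovals; infer_instance

-- ===== CLAIM (what is proved, stated in full; the proofs are below) =====
def Claim_equal_maxDominoRemovals : Prop := ∀ (tiles : List Int) (removalOrder : List Int) (minOrder : Int), Dom_maxDominoRemovals tiles removalOrder minOrder → Spec_maxDominoRemovals tiles removalOrder minOrder (maxDominoRemovals tiles removalOrder minOrder)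

-- ===== LEMMAS AND PROOFS =====

-- ---- the first-occurrence dict ----

-- index of the first occurrence of v in ro (proof-side helper)
def pvFirst? (ro : List Int) (v : Int) : Option Nat :=
  match ro with
  | [] => none
  | x :: xs => if x = v then some 0 else (pvFirst? xs v).map (· + 1)

lemma pvFirstDict_aux (ro : List Int) : ∀ (s : Int) (d : PySem.Dict Int Int) (v : Int),
    ((PySem.List.enumerate ro s).foldl
      (fun d p => if d.contains p.2 = true then d else d.insert p.2 p.1) d).get? v
    = if d.contains v = true then d.get? v
      else (pvFirst? ro v).map (fun j => s + (j : Int)) := by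
  induction ro with
  | nil =>
    intro s d v
    simp only [PySem.List.enumerate_nil, List.foldl_nil, pvFirst?]
    by_cases hc : d.contains v = true
    · rw [if_pos hc]
    · rw [if_neg hc]
      cases ho : d.get? v with
      | none => simp
      | some w =>
        exact absurd (by rw [PySem.Dict.contains_eq_isSome_get?, ho]; rfl) hc
  | cons x xs ih =>
    intro s d v
    rw [PySem.List.enumerate_cons, List.foldl_cons]
    have hred : (if d.contains (s, x).2 = true then d else d.insert (s, x).2 (s, x).1)
        = if d.contains x = true then d else d.insert x s := rfl
    rw [hred]
    by_cases hdx : d.contains x = true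
    · rw [if_pos hdx, ih]
      by_cases hdv : d.contains v = true
      · rw [if_pos hdv, if_pos hdv]
      · rw [if_neg hdv, if_neg hdv]
        have hxv : ¬ x = v := fun he => hdv (he ▸ hdx)
        rw [show pvFirst? (x :: xs) v = (pvFirst? xs v).map (· + 1) from by
          simp [pvFirst?, hxv]]
        cases pvFirst? xs v
        · simp
        · simp; omega
    · rw [if_neg hdx, ih]
      by_cases hxv : x = v
      · subst hxv
        simp [hdx, pvFirst?]
      · rw [PySem.Dict.contains_insert]
        have hvx : (v == x) = false := beq_eq_false_iff_ne.mpr (Ne.symm hxv)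
        rw [hvx, Bool.false_or]
        by_cases hdv : d.contains v = true
        · rw [if_pos hdv, if_pos hdv, PySem.Dict.get?_insert, if_neg (Ne.symm hxv)]
        · rw [if_neg hdv, if_neg hdv]
          rw [show pvFirst? (x :: xs) v = (pvFirst? xs v).map (· + 1) from by
            simp [pvFirst?, hxv]]
          cases pvFirst? xs v
          · simp
          · simp; omega

lemma pvFirstDict_get? (ro : List Int) (v : Int) :
    (pvFirstDict ro).get? v = (pvFirst? ro v).map (fun j => (j : Int)) := by
  unfold pvFirstDict
  rw [pvFirstDict_aux]
  simp [PySem.Dict.contains_empty]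

lemma pv_mem_take_iff (ro : List Int) (v : Int) : ∀ (m : Nat),
    v ∈ ro.take m ↔ ∃ j, pvFirst? ro v = some j ∧ j < m := by
  induction ro with
  | nil => intro m; simp [pvFirst?]
  | cons x xs ih =>
    intro m
    cases m with
    | zero => simp
    | succ m =>
      simp only [List.take_succ_cons, List.mem_cons]
      by_cases hxv : x = v
      · subst hxv
        simp [pvFirst?]
      · have hvx : ¬ v = x := Ne.symm hxv
        simp only [pvFirst?, hxv, if_false, hvx, false_or]
        rw [ih m]
        constructor
        · rintro ⟨j, hj, hjm⟩
          exact ⟨j + 1, by simp [hj], by omega⟩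
        · rintro ⟨j, hj, hjm⟩
          rcases hjf : pvFirst? xs v with _ | j'
          · simp [hjf] at hj
          · simp [hjf] at hj
            exact ⟨j', rfl, by omega⟩

-- keep-conditions of the two comprehensions agree (k ≥ 0)
lemma pvCond_eq (ro : List Int) (k : Int) (hk : 0 ≤ k) (i : Int) :
    (PySem.Set.contains (PySem.Set.ofList (PySem.List.slice ro none (some k))) i = false)
    ↔ (¬ (pvFirstDict ro).contains i = true ∨ k ≤ (pvFirstDict ro).getD i 0) := by
  rw [PySem.List.slice_to ro hk]
  have hcon : (pvFirstDict ro).contains i = ((pvFirst? ro i).map (fun j => (j : Int))).isSome := by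
    rw [PySem.Dict.contains_eq_isSome_get?, pvFirstDict_get?]
  have hgd : (pvFirstDict ro).getD i 0 = ((pvFirst? ro i).map (fun j => (j : Int))).getD 0 := by
    rw [PySem.Dict.getD_eq_get?_getD, pvFirstDict_get?]
  have hmem : (PySem.Set.contains (PySem.Set.ofList (ro.take k.toNat)) i = false)
      ↔ ¬ (i ∈ ro.take k.toNat) := by
    rw [show (PySem.Set.contains (PySem.Set.ofList (ro.take k.toNat)) i = false)
        ↔ ¬ (PySem.Set.contains (PySem.Set.ofList (ro.take k.toNat)) i = true) from by simp,
      PySem.Set.contains_iff, PySem.Set.mem_ofList]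
  rw [hmem, pv_mem_take_iff]
  rcases h : pvFirst? ro i with _ | j
  · simp [hcon, hgd, h]
  · simp [hcon, hgd, h]

-- ---- patience length = DP length ----

-- l.getD, the value of lis at index q
def pvL (l : List Int) (q : Nat) : Int := l.getD q 0

def pvInv (l : List Int) (best : Int) (dp : List (Int × Int)) : Prop :=
  l.Pairwise (· ≤ ·) ∧ best = (l.length : Int) ∧
  (∀ q : Nat, q < l.length → ∃ p ∈ dp, p.2 = (q : Int) + 1 ∧ p.1 = pvL l q) ∧
  (∀ p ∈ dp, 1 ≤ p.2 ∧ p.2 ≤ (l.length : Int) ∧ pvL l (p.2 - 1).toNat ≤ p.1)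

def pvD (dp : List (Int × Int)) (x : Int) : Int :=
  dp.foldl (fun d p => if p.1 < x ∧ p.2 + 1 > d then p.2 + 1 else d) 1

lemma pvD_spec_aux (x : Int) : ∀ (dp : List (Int × Int)) (a : Int),
    (a ≤ dp.foldl (fun d p => if p.1 < x ∧ p.2 + 1 > d then p.2 + 1 else d) a) ∧
    (∀ p ∈ dp, p.1 < x → p.2 + 1 ≤ dp.foldl (fun d p => if p.1 < x ∧ p.2 + 1 > d then p.2 + 1 else d) a) ∧
    (dp.foldl (fun d p => if p.1 < x ∧ p.2 + 1 > d then p.2 + 1 else d) a = a ∨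
      ∃ p ∈ dp, p.1 < x ∧ dp.foldl (fun d p => if p.1 < x ∧ p.2 + 1 > d then p.2 + 1 else d) a = p.2 + 1) := by
  intro dp
  induction dp with
  | nil => intro a; simp
  | cons p dp ih =>
    intro a
    simp only [List.foldl_cons]
    by_cases hc : p.1 < x ∧ p.2 + 1 > a
    · obtain ⟨h1, h2, h3⟩ := ih (p.2 + 1)
      rw [if_pos hc]
      refine ⟨by omega, ?_, ?_⟩
      · intro q hq hqx
        rcases List.mem_cons.mp hq with hq | hq
        · subst hq; omega
        · exact h2 q hq hqx
      · rcases h3 with h3 | ⟨q, hq, hqx, hqe⟩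
        · exact Or.inr ⟨p, List.mem_cons_self .., hc.1, h3⟩
        · exact Or.inr ⟨q, List.mem_cons_of_mem _ hq, hqx, hqe⟩
    · obtain ⟨h1, h2, h3⟩ := ih a
      rw [if_neg hc]
      refine ⟨h1, ?_, ?_⟩
      · intro q hq hqx
        rcases List.mem_cons.mp hq with hq | hq
        · subst hq
          have : ¬ (q.2 + 1 > a) := fun hgt => hc ⟨hqx, hgt⟩
          omega
        · exact h2 q hq hqx
      · rcases h3 with h3 | ⟨q, hq, hqx, hqe⟩
        · exact Or.inl h3
        · exact Or.inr ⟨q, List.mem_cons_of_mem _ hq, hqx, hqe⟩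

lemma pvD_spec (dp : List (Int × Int)) (x : Int) :
    (1 ≤ pvD dp x) ∧ (∀ p ∈ dp, p.1 < x → p.2 + 1 ≤ pvD dp x) ∧
    (pvD dp x = 1 ∨ ∃ p ∈ dp, p.1 < x ∧ pvD dp x = p.2 + 1) :=
  pvD_spec_aux x dp 1

lemma pvL_eq_getElem (l : List Int) (q : Nat) (h : q < l.length) : pvL l q = l[q] :=
  List.getD_eq_getElem l 0 h

lemma pvD_eq_pos (l : List Int) (best : Int) (dp : List (Int × Int)) (x : Int)
    (h : pvInv l best dp) :
    pvD dp x = (PySem.List.bisectLeft l x : Int) + 1 := by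
  obtain ⟨hsort, hbest, hwit, hbnd⟩ := h
  obtain ⟨hlen, hlt, hge⟩ := PySem.List.bisectLeft_spec l x hsort
  set pos := PySem.List.bisectLeft l x with hposdef
  obtain ⟨hd1, hdub, hdcase⟩ := pvD_spec dp x
  have hupper : pvD dp x ≤ (pos : Int) + 1 := by
    rcases hdcase with hd | ⟨p, hp, hpx, hpe⟩
    · omega
    · obtain ⟨hp1, hp2, hp3⟩ := hbnd p hp
      have hj : (p.2 - 1).toNat < l.length := by omega
      by_cases hjpos : pos ≤ (p.2 - 1).toNat
      · exfalso
        have := hge (p.2 - 1).toNat hj hjpos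
        rw [← pvL_eq_getElem l _ hj] at this
        omega
      · omega
  have hlower : (pos : Int) + 1 ≤ pvD dp x := by
    rcases Nat.eq_zero_or_pos pos with hp0 | hp0
    · rw [hp0]; omega
    · have hq : pos - 1 < l.length := by omega
      obtain ⟨p, hp, hpe, hpv⟩ := hwit (pos - 1) hq
      have hplt : p.1 < x := by
        have := hlt (pos - 1) hq (by omega)
        rw [← pvL_eq_getElem l _ hq] at this
        omega
      have := hdub p hp hplt
      omega
  omega

lemma pvInv_step (l : List Int) (best : Int) (dp : List (Int × Int)) (x : Int)
    (h : pvInv l best dp) :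
    pvInv (pvLisStepA l x) (pvLisDPStep (best, dp) x).1 (pvLisDPStep (best, dp) x).2 := by
  have hd := pvD_eq_pos l best dp x h
  obtain ⟨hsort, hbest, hwit, hbnd⟩ := h
  obtain ⟨hlen, hlt, hge⟩ := PySem.List.bisectLeft_spec l x hsort
  have hstep : pvLisDPStep (best, dp) x
      = (if pvD dp x > best then pvD dp x else best, dp ++ [(x, pvD dp x)]) := rfl
  rw [hstep]
  have hA : pvLisStepA l x = if PySem.List.bisectLeft l x = l.length then l ++ [x]
      else l.set (PySem.List.bisectLeft l x) x := rfl
  rw [hA]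
  set pos := PySem.List.bisectLeft l x with hposdef
  by_cases hpe : pos = l.length
  · -- append case
    rw [if_pos hpe]
    have hxgtall : ∀ a ∈ l, a ≤ x := by
      intro a ha
      obtain ⟨j, hj, rfl⟩ := List.mem_iff_getElem.mp ha
      have := hlt j hj (by omega)
      omega
    refine ⟨?_, ?_, ?_, ?_⟩
    · rw [List.pairwise_append]
      refine ⟨hsort, List.pairwise_singleton _ _, ?_⟩
      intro a ha b hb
      rw [List.mem_singleton] at hb
      subst hb
      exact hxgtall a ha
    · show (if pvD dp x > best then pvD dp x else best) = _
      rw [if_pos (by omega : pvD dp x > best)]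
      simp only [List.length_append, List.length_singleton]
      push_cast
      omega
    · intro q hq
      simp only [List.length_append, List.length_singleton] at hq
      by_cases hql : q < l.length
      · obtain ⟨p, hp, hp1, hp2⟩ := hwit q hql
        refine ⟨p, List.mem_append_left _ hp, hp1, ?_⟩
        rw [hp2]
        unfold pvL
        rw [List.getD_eq_getElem _ _ hql,
          List.getD_eq_getElem _ _ (by simp only [List.length_append, List.length_singleton]; omega),
          List.getElem_append_left hql]
      · have hqe : q = l.length := by omega
        refine ⟨(x, pvD dp x), List.mem_append_right _ (List.mem_singleton_self ..), ?_, ?_⟩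
        · show pvD dp x = (q : Int) + 1
          rw [hd]; omega
        · show x = pvL (l ++ [x]) q
          unfold pvL
          rw [List.getD_eq_getElem _ _ (by simp only [List.length_append, List.length_singleton]; omega)]
          subst hqe
          rw [List.getElem_concat_length]
          rfl
    · intro p hp
      rcases List.mem_append.mp hp with hp | hp
      · obtain ⟨hp1, hp2, hp3⟩ := hbnd p hp
        have hj : (p.2 - 1).toNat < l.length := by omega
        refine ⟨hp1, ?_, ?_⟩
        · simp only [List.length_append, List.length_singleton]
          push_cast
          omega
        · unfold pvL at hp3 ⊢
          rw [List.getD_eq_getElem _ _ hj] at hp3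
          rw [List.getD_eq_getElem _ _ (by simp only [List.length_append, List.length_singleton]; omega),
            List.getElem_append_left hj]
          exact hp3
      · rw [List.mem_singleton] at hp
        subst hp
        refine ⟨?_, ?_, ?_⟩
        · show (1 : Int) ≤ pvD dp x
          rw [hd]; omega
        · show pvD dp x ≤ ((l ++ [x]).length : Int)
          rw [hd]
          simp only [List.length_append, List.length_singleton]
          push_cast
          omega
        · show pvL (l ++ [x]) ((pvD dp x - 1).toNat) ≤ x
          have hidx : (pvD dp x - 1).toNat = l.length := by rw [hd]; omega
          rw [hidx]
          unfold pvL
          rw [List.getD_eq_getElem _ _ (by simp only [List.length_append, List.length_singleton]; omega),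
            List.getElem_concat_length]
          rfl
  · -- set case
    rw [if_neg hpe]
    have hposlt : pos < l.length := Nat.lt_of_le_of_ne hlen hpe
    have hLset : ∀ j, j < l.length → pvL (l.set pos x) j = if pos = j then x else pvL l j := by
      intro j hj
      unfold pvL
      rw [List.getD_eq_getElem _ _ (by simpa using hj), List.getD_eq_getElem _ _ hj]
      simp [List.getElem_set]
    refine ⟨?_, ?_, ?_, ?_⟩
    · rw [List.pairwise_iff_getElem] at hsort ⊢
      intro i j hi hj hij
      simp only [List.length_set] at hi hj
      rw [List.getElem_set, List.getElem_set]
      by_cases hip : pos = i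
      · rw [if_pos hip, if_neg (by omega)]
        exact hge j hj (by omega)
      · rw [if_neg hip]
        by_cases hjp : pos = j
        · rw [if_pos hjp]
          exact le_of_lt (hlt i hi (by omega))
        · rw [if_neg hjp]
          exact hsort i j hi hj hij
    · show (if pvD dp x > best then pvD dp x else best) = ((l.set pos x).length : Int)
      rw [if_neg (by omega : ¬ pvD dp x > best), hbest]
      simp only [List.length_set]
    · intro q hq
      simp only [List.length_set] at hq
      by_cases hqp : q = pos
      · subst hqp
        refine ⟨(x, pvD dp x), List.mem_append_right _ (List.mem_singleton_self ..), ?_, ?_⟩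
        · exact hd
        · show x = pvL (l.set pos x) pos
          rw [hLset pos hposlt, if_pos rfl]
      · obtain ⟨p, hp, hp1, hp2⟩ := hwit q hq
        refine ⟨p, List.mem_append_left _ hp, hp1, ?_⟩
        rw [hLset q hq, if_neg (by omega)]
        exact hp2
    · intro p hp
      rcases List.mem_append.mp hp with hp | hp
      · obtain ⟨hp1, hp2, hp3⟩ := hbnd p hp
        have hj : (p.2 - 1).toNat < l.length := by omega
        refine ⟨hp1, by simp only [List.length_set]; exact hp2, ?_⟩
        rw [hLset _ hj]
        by_cases hjp : pos = (p.2 - 1).toNat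
        · rw [if_pos hjp]
          have hx1 : x ≤ l[pos] := hge pos hposlt le_rfl
          rw [← hjp] at hp3
          rw [pvL_eq_getElem l pos hposlt] at hp3
          exact le_trans hx1 hp3
        · rw [if_neg hjp]
          exact hp3
      · rw [List.mem_singleton] at hp
        subst hp
        refine ⟨?_, ?_, ?_⟩
        · show (1 : Int) ≤ pvD dp x
          rw [hd]; omega
        · show pvD dp x ≤ ((l.set pos x).length : Int)
          rw [hd]
          simp only [List.length_set]
          omega
        · show pvL (l.set pos x) ((pvD dp x - 1).toNat) ≤ x
          have hidx : (pvD dp x - 1).toNat = pos := by rw [hd]; omega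
          rw [hidx, hLset pos hposlt, if_pos rfl]

lemma pvInv_foldl (arr : List Int) : ∀ (l : List Int) (best : Int) (dp : List (Int × Int)),
    pvInv l best dp →
    pvInv (arr.foldl pvLisStepA l) (arr.foldl pvLisDPStep (best, dp)).1
      (arr.foldl pvLisDPStep (best, dp)).2 := by
  induction arr with
  | nil => intro l best dp h; simpa using h
  | cons x arr ih =>
    intro l best dp h
    simp only [List.foldl_cons]
    exact ih _ _ _ (pvInv_step l best dp x h)

lemma pvLIS_eq (arr : List Int) : pvLengthOfLIS arr = pvLisDP arr := by
  have hbase : pvInv [] 0 [] := by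
    refine ⟨List.Pairwise.nil, by simp, ?_, ?_⟩ <;> simp
  have h := pvInv_foldl arr [] 0 [] hbase
  unfold pvLengthOfLIS pvLisDP
  exact h.2.1.symm

-- ---- the probes agree ----

lemma pvCan_eq (tiles ro : List Int) (mo : Int) (k : Int) (hk : 1 ≤ k) :
    pvCanRemoveA tiles ro mo k = pvCanRemoveB tiles (pvFirstDict ro) mo k := by
  simp only [pvCanRemoveA, pvCanRemoveB]
  have hF : ∀ (acc : List Int) (i : Int),
      (if PySem.Set.contains (PySem.Set.ofList (PySem.List.slice ro none (some k))) i = true then acc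
        else acc ++ [PySem.List.pyGetD tiles i 0])
      = (if ¬ (pvFirstDict ro).contains i = true ∨ k ≤ (pvFirstDict ro).getD i 0
        then acc ++ [PySem.List.pyGetD tiles i 0] else acc) := by
    intro acc i
    by_cases hc : ¬ (pvFirstDict ro).contains i = true ∨ k ≤ (pvFirstDict ro).getD i 0
    · rw [if_pos hc, if_neg]
      rw [(pvCond_eq ro k (by omega) i).mpr hc]
      simp
    · rw [if_neg hc]
      have hne : ¬ (PySem.Set.contains (PySem.Set.ofList (PySem.List.slice ro none (some k))) i = false) :=
        fun hf => hc ((pvCond_eq ro k (by omega) i).mp hf)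
      rw [if_pos (by
        cases hcc : PySem.Set.contains (PySem.Set.ofList (PySem.List.slice ro none (some k))) i
        · exact absurd hcc hne
        · rfl)]
  have hcong := PySem.List.foldl_congr_mem
    (l := PySem.List.pyRange 0 (tiles.length : Int) 1)
    (init := ([] : List Int))
    (f := fun acc i => if PySem.Set.contains (PySem.Set.ofList (PySem.List.slice ro none (some k))) i = true
      then acc else acc ++ [PySem.List.pyGetD tiles i 0])
    (g := fun acc i => if ¬ (pvFirstDict ro).contains i = true ∨ k ≤ (pvFirstDict ro).getD i 0
      then acc ++ [PySem.List.pyGetD tiles i 0] else acc)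
    (fun acc i _ => hF acc i)
  rw [hcong, pvLIS_eq]

-- ---- the binary searches agree ----

lemma pvBisearchGo_congr (c1 c2 : Int → Bool) (h : ∀ k, 1 ≤ k → c1 k = c2 k) :
    ∀ (fuel : Nat) (l r : Int), 0 ≤ l →
      pvBisearchGo fuel c1 l r = pvBisearchGo fuel c2 l r := by
  intro fuel
  induction fuel with
  | zero => intro l r _; rfl
  | succ m ih =>
    intro l r hl
    simp only [pvBisearchGo]
    by_cases hlr : l < r
    · rw [if_pos hlr, if_pos hlr]
      have hmid2 : PySem.Int.floordiv (l + r + 1) 2 = (l + r + 1) / 2 :=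
        PySem.Int.floordiv_eq_ediv_of_pos (by norm_num)
      rw [h (PySem.Int.floordiv (l + r + 1) 2) (by rw [hmid2]; omega)]
      by_cases hcm : c2 (PySem.Int.floordiv (l + r + 1) 2) = true
      · rw [if_pos hcm, if_pos hcm]
        exact ih _ _ (by rw [hmid2]; omega)
      · rw [if_neg hcm, if_neg hcm]
        exact ih _ _ hl
    · rw [if_neg hlr, if_neg hlr]

-- ===== VERDICT (by name: the statement is the Claim_ definition above) =====
theorem maxDominoRemovals_spec : Claim_equal_maxDominoRemovals := by
  intro tiles ro mo _
  unfold Spec_maxDominoRemovals maxDominoRemovals maxDominoRemovals_alt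
  exact pvBisearchGo_congr _ _ (fun k hk => pvCan_eq tiles ro mo k hk)
    ((tiles.length : Int) - 0).toNat 0 _ le_rfl
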